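-- pv_equiv track=rewrite | github.com/trongminh03/BKAI-Vietnamese-SLU | post-process/upper.py | capitalize_first_within_angle_brackets
-- ===== SOURCE A (Python) =====
-- def capitalize_first_within_angle_brackets(line):
--     result = []
--     inside_brackets = False
--     for char in line:
--         if char == '<':
--             inside_brackets = True
--             result.append(char)
--         elif inside_brackets:
--             result.append(char.upper())
--             inside_brackets = False
--         else:
--             result.append(char)
--     return ''.join(result)
-- ===== SOURCE B (Python) =====
-- def capitalize_first_within_angle_brackets(line):
--     parts = line.split('<')
--     return '<'.join([parts[0]] + [p[:1].upper() + p[1:] for p in parts[1:]])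
-- ===== Notes on version B (the rewrite author's own statement) =====
-- stated objective: idiomatic
-- what changed: Replaced the stateful per-character scan with a flag by staged passes: split the string on the bracket separator, capitalize the first character of each subsequent piece, and rejoin; the per-character Python loop is replaced by C-level str.split/str.join passes.
import Mathlib
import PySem

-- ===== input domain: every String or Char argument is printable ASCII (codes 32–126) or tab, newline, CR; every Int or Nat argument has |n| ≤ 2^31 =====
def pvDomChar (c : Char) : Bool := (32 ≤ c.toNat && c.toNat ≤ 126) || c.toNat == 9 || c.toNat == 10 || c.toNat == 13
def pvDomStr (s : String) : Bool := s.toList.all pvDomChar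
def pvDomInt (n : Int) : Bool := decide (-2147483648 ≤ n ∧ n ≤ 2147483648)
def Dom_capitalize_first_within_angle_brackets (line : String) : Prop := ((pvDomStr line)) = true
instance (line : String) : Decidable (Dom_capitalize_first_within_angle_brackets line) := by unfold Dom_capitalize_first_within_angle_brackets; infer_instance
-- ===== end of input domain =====

-- B replaces A's flag-carrying per-character scan with staged passes: split on '<', capitalize
-- the first character of every subsequent piece, rejoin with '<'; same cost, more idiomatic.

-- ===== PORT A =====
-- literal port of A: fold over the characters carrying (result, inside_brackets)
def capitalize_first_within_angle_brackets (line : String) : String :=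
  let st := line.toList.foldl (fun (st : List Char × Bool) c =>
    if c = '<' then (st.1 ++ [c], true)
    else if st.2 then (st.1 ++ [PySem.Chars.upperChar c], false)
    else (st.1 ++ [c], false)) ([], false)
  String.mk st.1

-- ===== PORT B =====
-- p[:1].upper() + p[1:]
def pvCapPiece (p : List Char) : List Char :=
  PySem.Chars.upper (PySem.List.slice p none (some 1)) ++ PySem.List.slice p (some 1) none

-- literal port of B: parts = line.split('<'); '<'.join([parts[0]] + [cap(p) for p in parts[1:]])
def capitalize_first_within_angle_brackets_alt (line : String) : String :=
  let parts := PySem.Chars.splitOn line.toList ['<']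
  String.mk (PySem.Chars.join ['<'] (parts.headD [] :: (parts.drop 1).map pvCapPiece))

-- ===== PRECONDITION & SPEC =====
def Spec_capitalize_first_within_angle_brackets (line : String) (out : String) : Prop := out = capitalize_first_within_angle_brackets_alt line
instance (line : String) (out : String) : Decidable (Spec_capitalize_first_within_angle_brackets line out) := by unfold Spec_capitalize_first_within_angle_brackets; infer_instance

-- ===== CLAIM (what is proved, stated in full; the proofs are below) =====
def Claim_equal_capitalize_first_within_angle_brackets : Prop := ∀ (line : String), Dom_capitalize_first_within_angle_brackets line → Spec_capitalize_first_within_angle_brackets line (capitalize_first_within_angle_brackets line)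

-- ===== LEMMAS AND PROOFS =====

-- the common recursive specification both programs are reduced to
def pvSpecRun (flag : Bool) : List Char → List Char
  | [] => []
  | c :: t =>
      if c = '<' then c :: pvSpecRun true t
      else (if flag then PySem.Chars.upperChar c else c) :: pvSpecRun false t

-- the pieces line.split('<') produces, defined structurally
def pvPieces : List Char → List (List Char)
  | [] => [[]]
  | c :: t =>
      if c = '<' then [] :: pvPieces t
      else match pvPieces t with
        | [] => [[c]]
        | p :: ps => (c :: p) :: ps

theorem pvPieces_ne_nil (l : List Char) : pvPieces l ≠ [] := by
  cases l with
  | nil => simp [pvPieces]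
  | cons c t =>
    simp only [pvPieces]
    split_ifs
    · simp
    · cases pvPieces t <;> simp

theorem pvCapPiece_nil : pvCapPiece [] = [] := by decide

theorem pvCapPiece_cons (c : Char) (t : List Char) :
    pvCapPiece (c :: t) = PySem.Chars.upperChar c :: t := by
  unfold pvCapPiece
  rw [PySem.List.slice_to (c :: t) (by norm_num : (0:Int) ≤ 1),
      PySem.List.slice_from (c :: t) (by norm_num : (0:Int) ≤ 1)]
  simp [PySem.Chars.upper]

-- splitOn.go with enough fuel computes pvPieces (with the pending piece cur and acc folded in)
theorem pv_go_eq_pieces (l : List Char) (cur : List Char) (acc : List (List Char)) (fuel : Nat)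
    (hf : l.length ≤ fuel) :
    PySem.Chars.splitOn.go ['<'] fuel l cur acc
      = acc.reverse ++ (match pvPieces l with
          | [] => [cur.reverse]
          | p :: ps => (cur.reverse ++ p) :: ps) := by
  induction l generalizing cur acc fuel with
  | nil =>
    cases fuel <;> simp [PySem.Chars.splitOn.go, pvPieces]
  | cons c t ih =>
    cases fuel with
    | zero => simp at hf
    | succ f =>
      simp only [PySem.Chars.splitOn.go]
      by_cases hc : c = '<'
      · subst hc
        have hpre : List.isPrefixOf ['<'] ('<' :: t) = true := by
          simp [List.isPrefixOf]
        simp only [hpre, if_true, List.length_cons, List.length_nil, List.drop_succ_cons, List.drop_zero]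
        rw [ih [] (cur.reverse :: acc) f (by simpa using hf)]
        have hne := pvPieces_ne_nil t
        cases hp : pvPieces t with
        | nil => exact absurd hp hne
        | cons p ps => simp [pvPieces, hp]
      · have hpre : List.isPrefixOf ['<'] (c :: t) = false := by
          simp only [List.isPrefixOf, Bool.and_true, beq_eq_false_iff_ne, ne_eq]
          exact fun h => hc h.symm
        simp only [hpre, Bool.false_eq_true, if_false]
        rw [ih (c :: cur) acc f (by simpa using hf)]
        have hne := pvPieces_ne_nil t
        cases hp : pvPieces t with
        | nil => exact absurd hp hne
        | cons p ps => simp [pvPieces, hc, hp]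

-- splitOn on '<' is exactly pvPieces
theorem pv_splitOn_eq_pieces (l : List Char) :
    PySem.Chars.splitOn l ['<'] = pvPieces l := by
  unfold PySem.Chars.splitOn
  rw [pv_go_eq_pieces l [] [] (l.length + 1) (Nat.le_succ _)]
  have hne := pvPieces_ne_nil l
  cases hp : pvPieces l with
  | nil => exact absurd hp hne
  | cons p ps => simp

-- A's fold is pvSpecRun
theorem pv_fold_eq_specRun (l : List Char) (flag : Bool) (acc : List Char) :
    (l.foldl (fun (st : List Char × Bool) c =>
      if c = '<' then (st.1 ++ [c], true)
      else if st.2 then (st.1 ++ [PySem.Chars.upperChar c], false)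
      else (st.1 ++ [c], false)) (acc, flag)).1 = acc ++ pvSpecRun flag l := by
  induction l generalizing flag acc with
  | nil => simp [pvSpecRun]
  | cons c t ih =>
    simp only [List.foldl_cons, pvSpecRun]
    by_cases hc : c = '<'
    · subst hc; simp only [if_true]
      rw [ih true (acc ++ ['<'])]; simp
    · cases flag
      · simp only [hc, if_false, Bool.false_eq_true]
        rw [ih false (acc ++ [c])]; simp
      · simp only [hc, if_false, if_true]
        rw [ih false (acc ++ [PySem.Chars.upperChar c])]; simp

-- join peels a leading non-separator character off the first piece
theorem pv_join_cons_char (x : Char) (q : List Char) (R : List (List Char)) :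
    PySem.Chars.join ['<'] ((x :: q) :: R) = x :: PySem.Chars.join ['<'] (q :: R) := by
  cases R with
  | nil => simp [PySem.Chars.join_singleton]
  | cons r rs => simp [PySem.Chars.join_cons_cons]

-- joining the capitalized pieces reproduces the flagged scan
theorem pv_join_pieces (l : List Char) (flag : Bool) (p : List Char) (ps : List (List Char))
    (hp : pvPieces l = p :: ps) :
    PySem.Chars.join ['<'] ((if flag then pvCapPiece p else p) :: ps.map pvCapPiece)
      = pvSpecRun flag l := by
  induction l generalizing flag p ps with
  | nil =>
    simp only [pvPieces] at hp
    obtain ⟨rfl, rfl⟩ : ([] : List Char) = p ∧ ([] : List (List Char)) = ps := by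
      cases hp; exact ⟨rfl, rfl⟩
    cases flag <;> simp [pvCapPiece_nil, PySem.Chars.join_singleton, pvSpecRun]
  | cons c t ih =>
    have hne := pvPieces_ne_nil t
    by_cases hc : c = '<'
    · subst hc
      simp only [pvPieces, if_true] at hp
      obtain ⟨rfl, rfl⟩ : ([] : List Char) = p ∧ pvPieces t = ps := by
        cases hp; exact ⟨rfl, rfl⟩
      cases hq : pvPieces t with
      | nil => exact absurd hq hne
      | cons q qs =>
        have hstep := ih true q qs hq
        simp only [List.map_cons]
        have h0 : (if flag then pvCapPiece [] else []) = ([] : List Char) := by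
          cases flag <;> simp [pvCapPiece_nil]
        rw [h0, PySem.Chars.join_cons_cons]
        simp only [pvSpecRun, if_true]
        simpa using hstep
    · cases hq : pvPieces t with
      | nil => exact absurd hq hne
      | cons q qs =>
        simp only [pvPieces, hc, if_false, hq] at hp
        obtain ⟨rfl, rfl⟩ : c :: q = p ∧ qs = ps := by
          cases hp; exact ⟨rfl, rfl⟩
        have hcap : (if flag then pvCapPiece (c :: q) else c :: q)
            = (if flag then PySem.Chars.upperChar c else c) :: q := by
          cases flag <;> simp [pvCapPiece_cons]
        have h2 := ih false q qs hq
        simp only [Bool.false_eq_true, if_false] at h2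
        rw [hcap, pv_join_cons_char, h2]
        simp [pvSpecRun, hc]

-- ===== VERDICT (by name: the statement is the Claim_ definition above) =====
theorem capitalize_first_within_angle_brackets_spec : Claim_equal_capitalize_first_within_angle_brackets := by
  intro line _
  unfold Spec_capitalize_first_within_angle_brackets capitalize_first_within_angle_brackets capitalize_first_within_angle_brackets_alt
  have hA := pv_fold_eq_specRun line.toList false []
  have hne := pvPieces_ne_nil line.toList
  cases hp : pvPieces line.toList with
  | nil => exact absurd hp hne
  | cons p ps =>
    have hB := pv_join_pieces line.toList false p ps hp
    simp only [if_false, Bool.false_eq_true] at hB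
    simp only [pv_splitOn_eq_pieces, hp, List.headD_cons, List.drop_succ_cons, List.drop_zero]
    rw [hA, hB]
    simp
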